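-- pv_equiv track=rewrite | github.com/tommoirnz/NOVAKnowledge_3 | planner.py | _get_current_topic
-- ===== SOURCE A (Python) =====
-- def _get_current_topic(history_str, exchanges=None):
--     """Extract the current topic from recent history.
--     Returns the most recently matched topic rather than just the last one.
--     """
--     if not history_str and not exchanges:
--         return None
--
--     topics = []
--
--     if exchanges:
--         recent_exchanges = exchanges[-20:] if len(exchanges) > 20 else exchanges
--     else:
--         lines = history_str.split('\n')[-20:]
--         recent_exchanges = ['\n'.join(lines)]
--
--     # FIX 5: Walk in forward order so topics[-1] is genuinely the most recent match
--     for exchange in recent_exchanges: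
--         exchange_lower = exchange.lower()
--         if 'diagram' in exchange_lower or 'graphviz' in exchange_lower or 'block diagram' in exchange_lower:
--             topics.append('diagram')
--         elif 'plot' in exchange_lower or 'graph' in exchange_lower or 'chart' in exchange_lower:
--             topics.append('plot')
--         elif 'math' in exchange_lower or 'integral' in exchange_lower or 'derivative' in exchange_lower:
--             topics.append('math')
--         elif 'code' in exchange_lower or 'python' in exchange_lower:
--             topics.append('code')
--         elif 'image' in exchange_lower or 'picture' in exchange_lower:
--             topics.append('image')
--         elif 'music' in exchange_lower or 'play' in exchange_lower:
--             topics.append('audio')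
--
--     return topics[-1] if topics else None
-- ===== SOURCE B (Python) =====
-- _TOPIC_KEYWORDS = [
--     ('diagram', ('diagram', 'graphviz')),
--     ('plot', ('plot', 'graph', 'chart')),
--     ('math', ('math', 'integral', 'derivative')),
--     ('code', ('code', 'python')),
--     ('image', ('image', 'picture')),
--     ('audio', ('music', 'play')),
-- ]
--
--
-- def _get_current_topic(history_str, exchanges=None):
--     """Extract the current topic from recent history (most recent match wins)."""
--     if exchanges:
--         recent = exchanges[-20:]
--     elif history_str:
--         recent = ['\n'.join(history_str.split('\n')[-20:])]
--     else:
--         return None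
--     for exchange in reversed(recent):
--         low = exchange.lower()
--         for topic, keywords in _TOPIC_KEYWORDS:
--             if any(k in low for k in keywords):
--                 return topic
--     return None
-- ===== Notes on version B (the rewrite author's own statement) =====
-- stated objective: simpler
-- what changed: Replaces the accumulate-all-topics-then-take-last loop over a hard-coded six-branch cascade with a reverse scan that early-returns on the first match, driven by a keyword table instead of the branch cascade (the redundant 'block diagram' check, subsumed by 'diagram', is dropped).
import Mathlib
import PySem

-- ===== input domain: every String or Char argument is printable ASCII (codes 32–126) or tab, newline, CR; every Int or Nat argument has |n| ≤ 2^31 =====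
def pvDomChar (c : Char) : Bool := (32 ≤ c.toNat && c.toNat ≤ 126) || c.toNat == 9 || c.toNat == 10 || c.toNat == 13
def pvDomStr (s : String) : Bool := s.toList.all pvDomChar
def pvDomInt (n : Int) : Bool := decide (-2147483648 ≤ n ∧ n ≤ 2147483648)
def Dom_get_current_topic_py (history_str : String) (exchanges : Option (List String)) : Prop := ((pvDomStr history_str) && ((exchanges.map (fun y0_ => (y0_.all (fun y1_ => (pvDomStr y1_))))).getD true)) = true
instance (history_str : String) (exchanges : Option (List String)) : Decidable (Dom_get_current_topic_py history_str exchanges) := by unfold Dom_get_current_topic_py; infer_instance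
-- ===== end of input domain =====

-- B replaces A's accumulate-then-take-last loop over a hard-coded branch cascade by a
-- table-driven reverse scan returning the first match; return values only are compared.

-- ===== PORT A =====
-- truthiness of the optional list argument ('if exchanges:')
def pvTruthyEx (exchanges : Option (List String)) : Bool :=
  match exchanges with
  | some (_ :: _) => true
  | _ => false

def get_current_topic_py (history_str : String) (exchanges : Option (List String)) : Option String :=
  if PySem.Str.len history_str == 0 && !pvTruthyEx exchanges then none
  else
    let recent_exchanges : List String :=
      if pvTruthyEx exchanges then
        let l := exchanges.getD []
        if l.length > 20 then PySem.List.slice l (some (-20)) none else l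
      else
        let lines := PySem.List.slice ((PySem.Str.split? history_str "\n").getD []) (some (-20)) none
        [PySem.Str.join "\n" lines]
    let topics : List String := recent_exchanges.foldl (fun acc exch =>
      let low := PySem.Str.lower exch
      if PySem.Str.isIn "diagram" low || PySem.Str.isIn "graphviz" low || PySem.Str.isIn "block diagram" low then
        acc ++ ["diagram"]
      else if PySem.Str.isIn "plot" low || PySem.Str.isIn "graph" low || PySem.Str.isIn "chart" low then
        acc ++ ["plot"]
      else if PySem.Str.isIn "math" low || PySem.Str.isIn "integral" low || PySem.Str.isIn "derivative" low then
        acc ++ ["math"]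
      else if PySem.Str.isIn "code" low || PySem.Str.isIn "python" low then
        acc ++ ["code"]
      else if PySem.Str.isIn "image" low || PySem.Str.isIn "picture" low then
        acc ++ ["image"]
      else if PySem.Str.isIn "music" low || PySem.Str.isIn "play" low then
        acc ++ ["audio"]
      else acc) []
    if topics = [] then none else PySem.List.pyGet? topics (-1)

-- ===== PORT B =====
def pvTopicKeywords : List (String × List String) :=
  [("diagram", ["diagram", "graphviz"]),
   ("plot", ["plot", "graph", "chart"]),
   ("math", ["math", "integral", "derivative"]),
   ("code", ["code", "python"]),
   ("image", ["image", "picture"]),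
   ("audio", ["music", "play"])]

def get_current_topic_py_alt (history_str : String) (exchanges : Option (List String)) : Option String :=
  let recent? : Option (List String) :=
    match exchanges with
    | some (x :: xs) => some (PySem.List.slice (x :: xs) (some (-20)) none)
    | _ =>
      if PySem.Str.len history_str == 0 then none
      else some [PySem.Str.join "\n" (PySem.List.slice ((PySem.Str.split? history_str "\n").getD []) (some (-20)) none)]
  match recent? with
  | none => none
  | some recent =>
    recent.reverse.findSome? (fun exch =>
      let low := PySem.Str.lower exch
      pvTopicKeywords.findSome? (fun p =>
        if p.2.any (fun k => PySem.Str.isIn k low) then some p.1 else none))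

-- ===== PRECONDITION & SPEC =====
def Spec_get_current_topic_py (history_str : String) (exchanges : Option (List String)) (out : Option String) : Prop := out = get_current_topic_py_alt history_str exchanges
instance (history_str : String) (exchanges : Option (List String)) (out : Option String) : Decidable (Spec_get_current_topic_py history_str exchanges out) := by unfold Spec_get_current_topic_py; infer_instance

-- ===== CLAIM (what is proved, stated in full; the proofs are below) =====
def Claim_equal_get_current_topic_py : Prop := ∀ (history_str : String) (exchanges : Option (List String)), Dom_get_current_topic_py history_str exchanges → Spec_get_current_topic_py history_str exchanges (get_current_topic_py history_str exchanges)

-- ===== LEMMAS AND PROOFS =====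

-- A's classifier for one exchange, as an Option-valued function
def pvClassifyA (exch : String) : Option String :=
  let low := PySem.Str.lower exch
  if PySem.Str.isIn "diagram" low || PySem.Str.isIn "graphviz" low || PySem.Str.isIn "block diagram" low then
    some "diagram"
  else if PySem.Str.isIn "plot" low || PySem.Str.isIn "graph" low || PySem.Str.isIn "chart" low then
    some "plot"
  else if PySem.Str.isIn "math" low || PySem.Str.isIn "integral" low || PySem.Str.isIn "derivative" low then
    some "math"
  else if PySem.Str.isIn "code" low || PySem.Str.isIn "python" low then
    some "code"
  else if PySem.Str.isIn "image" low || PySem.Str.isIn "picture" low then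
    some "image"
  else if PySem.Str.isIn "music" low || PySem.Str.isIn "play" low then
    some "audio"
  else none

def pvClassifyB (exch : String) : Option String :=
  let low := PySem.Str.lower exch
  pvTopicKeywords.findSome? (fun p =>
    if p.2.any (fun k => PySem.Str.isIn k low) then some p.1 else none)

-- 'block diagram' in s implies 'diagram' in s (substring transitivity)
theorem pv_block_diagram (low : List Char) (h : PySem.Chars.isIn ['b','l','o','c','k',' ','d','i','a','g','r','a','m'] low = true) :
    PySem.Chars.isIn ['d','i','a','g','r','a','m'] low = true := by
  rw [PySem.Chars.isIn_iff_infix] at h ⊢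
  exact List.IsInfix.trans (by decide) h

theorem pv_classify_eq (exch : String) : pvClassifyA exch = pvClassifyB exch := by
  unfold pvClassifyA pvClassifyB pvTopicKeywords
  by_cases hd : PySem.Chars.isIn ['d','i','a','g','r','a','m'] (PySem.Chars.lower exch.toList) = true
  · simp [List.findSome?, hd]
  · rw [Bool.not_eq_true] at hd
    have hb : PySem.Chars.isIn ['b','l','o','c','k',' ','d','i','a','g','r','a','m'] (PySem.Chars.lower exch.toList) = false := by
      by_contra hh
      rw [Bool.not_eq_false] at hh
      rw [pv_block_diagram _ hh] at hd
      cases hd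
    simp [List.findSome?, hd, hb]
    simp only [or_assoc]
    split_ifs <;> rfl

theorem pv_foldl_classifyA (l : List String) (acc : List String) :
    l.foldl (fun acc exch =>
      let low := PySem.Str.lower exch
      if PySem.Str.isIn "diagram" low || PySem.Str.isIn "graphviz" low || PySem.Str.isIn "block diagram" low then
        acc ++ ["diagram"]
      else if PySem.Str.isIn "plot" low || PySem.Str.isIn "graph" low || PySem.Str.isIn "chart" low then
        acc ++ ["plot"]
      else if PySem.Str.isIn "math" low || PySem.Str.isIn "integral" low || PySem.Str.isIn "derivative" low then
        acc ++ ["math"]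
      else if PySem.Str.isIn "code" low || PySem.Str.isIn "python" low then
        acc ++ ["code"]
      else if PySem.Str.isIn "image" low || PySem.Str.isIn "picture" low then
        acc ++ ["image"]
      else if PySem.Str.isIn "music" low || PySem.Str.isIn "play" low then
        acc ++ ["audio"]
      else acc) acc = acc ++ l.filterMap pvClassifyA := by
  induction l generalizing acc with
  | nil => simp
  | cons x xs ih =>
    simp only [List.foldl_cons, List.filterMap_cons]
    rw [ih]
    unfold pvClassifyA
    simp only []
    split_ifs <;> simp

-- reversed early-return scan = last element of the forward filterMap
theorem pv_findSome_reverse {α β : Type} (f : α → Option β) (l : List α) :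
    l.reverse.findSome? f = (l.filterMap f).getLast? := by
  induction l with
  | nil => simp
  | cons x xs ih =>
    simp only [List.reverse_cons, List.findSome?_append, List.filterMap_cons, ih]
    cases hfx : f x with
    | none =>
      simp [List.findSome?, hfx]
    | some b =>
      cases hxs : xs.filterMap f with
      | nil => simp [List.findSome?, hfx]
      | cons y ys =>
        obtain ⟨z, hz⟩ := Option.isSome_iff_exists.mp
          (List.getLast?_isSome.mpr (by simp : (y :: ys) ≠ []))
        simp [List.findSome?, hfx, hz]

-- topics[-1] (on a nonempty list) is getLast?
theorem pv_pyGet_neg_one (l : List String) (h : l ≠ []) :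
    PySem.List.pyGet? l (-1) = l.getLast? := by
  cases l with
  | nil => simp at h
  | cons x xs =>
    simp [PySem.List.pyGet?, PySem.List.pyIdx?, List.getLast?_eq_getElem?]

-- xs[-20:] = xs when len(xs) ≤ 20
theorem pv_slice_small (l : List String) (h : ¬ l.length > 20) :
    PySem.List.slice l (some (-20)) none = l := by
  rw [PySem.List.slice_from_neg_ofNat l 20 (by omega)]
  have h0 : l.length - 20 = 0 := by omega
  simp [h0]

-- A's tail step ('topics[-1] if topics else None') on the classified list = B's reversed scan
theorem pv_last_eq_revscan (l : List String) :
    (if l.filterMap pvClassifyA = [] then none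
     else PySem.List.pyGet? (l.filterMap pvClassifyA) (-1))
      = l.reverse.findSome? (fun exch =>
          let low := PySem.Str.lower exch
          pvTopicKeywords.findSome? (fun p =>
            if p.2.any (fun k => PySem.Str.isIn k low) then some p.1 else none)) := by
  have hfb : (fun exch =>
          let low := PySem.Str.lower exch
          pvTopicKeywords.findSome? (fun p =>
            if p.2.any (fun k => PySem.Str.isIn k low) then some p.1 else none)) = pvClassifyB := rfl
  rw [hfb, pv_findSome_reverse]
  have hcl : l.filterMap pvClassifyB = l.filterMap pvClassifyA :=
    List.filterMap_congr (fun a _ => (pv_classify_eq a).symm)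
  rw [hcl]
  cases h : l.filterMap pvClassifyA with
  | nil => simp
  | cons y ys =>
    rw [if_neg (by simp), pv_pyGet_neg_one _ (by simp)]

-- ===== VERDICT (by name: the statement is the Claim_ definition above) =====
theorem get_current_topic_py_spec : Claim_equal_get_current_topic_py := by
  intro history_str exchanges _
  unfold Spec_get_current_topic_py get_current_topic_py get_current_topic_py_alt
  match exchanges with
  | some (x :: xs) =>
    have ht : pvTruthyEx (some (x :: xs)) = true := rfl
    rw [ht]
    simp only [Bool.not_true, Bool.and_false, Bool.false_eq_true, if_false, if_true,
      Option.getD_some]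
    rw [pv_foldl_classifyA, List.nil_append]
    by_cases hl : (x :: xs).length > 20
    · rw [if_pos hl]
      exact pv_last_eq_revscan _
    · rw [if_neg hl]
      conv_rhs => rw [pv_slice_small (x :: xs) hl]
      exact pv_last_eq_revscan _
  | none =>
    have ht : pvTruthyEx none = false := rfl
    rw [ht]
    simp only [Bool.not_false, Bool.and_true]
    by_cases hh : (PySem.Str.len history_str == 0) = true
    · rw [if_pos hh, if_pos hh]
    · rw [if_neg hh, if_neg hh]
      rw [pv_foldl_classifyA, List.nil_append]
      exact pv_last_eq_revscan _
  | some [] =>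
    have ht : pvTruthyEx (some []) = false := rfl
    rw [ht]
    simp only [Bool.not_false, Bool.and_true]
    by_cases hh : (PySem.Str.len history_str == 0) = true
    · rw [if_pos hh, if_pos hh]
    · rw [if_neg hh, if_neg hh]
      rw [pv_foldl_classifyA, List.nil_append]
      exact pv_last_eq_revscan _
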